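-- pv_equiv track=rewrite | github.com/SuffleWaffle/pdf_elements_parsing_api | src_utils/table_values_heuristics.py | column_heuristic
-- ===== SOURCE A (Python) =====
-- def column_heuristic(columns, patterns, inner_check=False, anti_pattern=None):
--     chosen_cols = []
--     for col in columns:
--         for pat in patterns:
--             rule = False
--             if inner_check:
--                 rule = any([i.strip() == pat for i in col.lower().split()])
--             if col.lower() == pat or rule:
--                 chosen_cols.append(col)
--                 break
--     if anti_pattern:
--         to_del = set()
--         for i in anti_pattern:
--             for c, j in enumerate(chosen_cols):
--                 if j.lower() == i.lower():
--                     to_del.add(c)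
--         return [i for c, i in enumerate(chosen_cols) if c not in to_del]
--     return chosen_cols
-- ===== SOURCE B (Python) =====
-- def column_heuristic(columns, patterns, inner_check=False, anti_pattern=None):
--     anti = {a.lower() for a in anti_pattern} if anti_pattern else set()
--
--     def matches(low):
--         return any(low == p or
--                    (inner_check and any(w.strip() == p for w in low.split()))
--                    for p in patterns)
--
--     return [c for c in columns if matches(c.lower()) and c.lower() not in anti]
-- ===== Notes on version B (the rewrite author's own statement) =====
-- stated objective: simpler
-- what changed: Replaced A's two sequential passes (append-with-break loop building chosen_cols, then an index set collected via enumerate and a second enumerate pass deleting by position) with a single order-preserving filter over columns using an any()-based match test and a precomputed lowered anti-pattern set.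
import Mathlib
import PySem

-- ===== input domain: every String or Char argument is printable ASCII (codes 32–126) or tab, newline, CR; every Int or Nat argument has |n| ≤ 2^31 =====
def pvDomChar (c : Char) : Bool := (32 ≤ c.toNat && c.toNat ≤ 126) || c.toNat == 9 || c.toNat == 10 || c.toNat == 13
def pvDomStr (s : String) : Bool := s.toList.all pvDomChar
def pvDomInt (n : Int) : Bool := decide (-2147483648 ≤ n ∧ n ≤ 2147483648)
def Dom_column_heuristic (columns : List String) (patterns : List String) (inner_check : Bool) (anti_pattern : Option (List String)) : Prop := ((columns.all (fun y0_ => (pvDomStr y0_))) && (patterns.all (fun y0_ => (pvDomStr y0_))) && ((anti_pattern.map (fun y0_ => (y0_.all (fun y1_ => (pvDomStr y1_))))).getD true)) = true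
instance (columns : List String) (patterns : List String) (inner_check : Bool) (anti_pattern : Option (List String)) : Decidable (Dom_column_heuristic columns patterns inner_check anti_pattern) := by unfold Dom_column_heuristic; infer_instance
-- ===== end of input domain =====

-- B fuses A's two passes (build chosen_cols, then delete by collected indices) into a single
-- filter over columns using a precomputed lowered anti-pattern set; objective: simpler, no speed claim.


-- ===== PORT A =====
-- inner `for pat in patterns: … break` loop of A
def chAInner (col : String) (inner_check : Bool) : List String → Bool
  | [] => false
  | pat :: rest =>
    let rule := if inner_check
      then ((PySem.Str.split₀ (PySem.Str.lower col)).map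
              (fun i => PySem.Str.strip i == pat)).any (fun b => b)
      else false
    if (PySem.Str.lower col == pat) || rule then true else chAInner col inner_check rest

def column_heuristic (columns : List String) (patterns : List String) (inner_check : Bool) (anti_pattern : Option (List String)) : List String :=
  let chosen_cols := columns.foldl
    (fun acc col => if chAInner col inner_check patterns then acc ++ [col] else acc) []
  match anti_pattern with
  | some ap =>
    if ap.isEmpty then chosen_cols
    else
      let to_del : PySem.Set Int := ap.foldl (fun s i =>
        (PySem.List.enumerate chosen_cols).foldl (fun s cj =>
          if PySem.Str.lower cj.2 == PySem.Str.lower i then PySem.Set.add s cj.1 else s) s)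
        PySem.Set.empty
      (PySem.List.enumerate chosen_cols).foldl
        (fun acc ci => if !(PySem.Set.contains to_del ci.1) then acc ++ [ci.2] else acc) []
  | none => chosen_cols

-- ===== PORT B =====
-- `matches(low)` of Source B
def bMatches (low : String) (inner_check : Bool) (patterns : List String) : Bool :=
  patterns.any (fun p =>
    low == p || (inner_check && (PySem.Str.split₀ low).any (fun w => PySem.Str.strip w == p)))

def column_heuristic_alt (columns : List String) (patterns : List String) (inner_check : Bool) (anti_pattern : Option (List String)) : List String :=
  let anti : PySem.Set String :=
    match anti_pattern with
    | some ap => if ap.isEmpty then PySem.Set.empty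
                 else PySem.Set.ofList (ap.map PySem.Str.lower)
    | none => PySem.Set.empty
  columns.filter (fun c =>
    bMatches (PySem.Str.lower c) inner_check patterns
      && !(PySem.Set.contains anti (PySem.Str.lower c)))

-- ===== PRECONDITION & SPEC =====
def Spec_column_heuristic (columns : List String) (patterns : List String) (inner_check : Bool) (anti_pattern : Option (List String)) (out : List String) : Prop := out = column_heuristic_alt columns patterns inner_check anti_pattern
instance (columns : List String) (patterns : List String) (inner_check : Bool) (anti_pattern : Option (List String)) (out : List String) : Decidable (Spec_column_heuristic columns patterns inner_check anti_pattern out) := by unfold Spec_column_heuristic; infer_instance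

-- ===== CLAIM (what is proved, stated in full; the proofs are below) =====
def Claim_equal_column_heuristic : Prop := ∀ (columns : List String) (patterns : List String) (inner_check : Bool) (anti_pattern : Option (List String)), Dom_column_heuristic columns patterns inner_check anti_pattern → Spec_column_heuristic columns patterns inner_check anti_pattern (column_heuristic columns patterns inner_check anti_pattern)

-- ===== LEMMAS AND PROOFS =====

-- A's break-loop equals B's `any`
theorem chAInner_eq (col : String) (ic : Bool) (pats : List String) :
    chAInner col ic pats = bMatches (PySem.Str.lower col) ic pats := by
  induction pats with
  | nil => simp [chAInner, bMatches]
  | cons p rest ih =>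
    rw [show chAInner col ic (p :: rest) =
        (if (PySem.Str.lower col == p) ||
            (ic && (PySem.Str.split₀ (PySem.Str.lower col)).any
              (fun w => PySem.Str.strip w == p)) then true
         else chAInner col ic rest) from by
      cases ic <;> simp [chAInner, List.any_map, Function.comp]]
    rw [ih]
    cases h : ((PySem.Str.lower col == p) ||
        (ic && (PySem.Str.split₀ (PySem.Str.lower col)).any
          (fun w => PySem.Str.strip w == p))) <;>
      simp [bMatches, List.any_cons, h]

-- membership in a fold that conditionally adds mapped elements to a set
theorem mem_foldl_add_ite {α : Type} (q : α → Bool) (f : α → Int) :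
    ∀ (L : List α) (s : PySem.Set Int) (c : Int),
      (c ∈ L.foldl (fun s x => if q x then PySem.Set.add s (f x) else s) s) ↔
        c ∈ s ∨ ∃ x ∈ L, q x ∧ f x = c := by
  intro L
  induction L with
  | nil => simp
  | cons x xs ih =>
    intro s c
    simp only [List.foldl_cons]
    cases hq : q x
    · simp [ih, hq]
    · rw [ih]
      simp [PySem.Set.mem_add, hq]
      tauto

-- membership characterisation of A's to_del set
theorem mem_toDel (E : List (Int × String)) :
    ∀ (ap : List String) (s : PySem.Set Int) (c : Int),
      (c ∈ ap.foldl (fun s i =>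
          E.foldl (fun s cj =>
            if PySem.Str.lower cj.2 == PySem.Str.lower i then PySem.Set.add s cj.1 else s) s) s) ↔
        c ∈ s ∨ ∃ i ∈ ap, ∃ x ∈ E, PySem.Str.lower x.2 = PySem.Str.lower i ∧ x.1 = c := by
  intro ap
  induction ap with
  | nil => simp
  | cons i rest ih =>
    intro s c
    simp only [List.foldl_cons]
    rw [ih, mem_foldl_add_ite (fun cj => PySem.Str.lower cj.2 == PySem.Str.lower i) Prod.fst E]
    simp only [beq_iff_eq, List.mem_cons]
    constructor
    · rintro (((h | ⟨x, hx, h1, h2⟩) | ⟨j, hj, hx⟩))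
      · exact Or.inl h
      · exact Or.inr ⟨i, Or.inl rfl, x, hx, h1, h2⟩
      · obtain ⟨y, hy, hrest⟩ := hx
        exact Or.inr ⟨j, Or.inr hj, y, hy, hrest⟩
    · rintro (h | ⟨j, (rfl | hj), y, hy, h1, h2⟩)
      · exact Or.inl (Or.inl h)
      · exact Or.inl (Or.inr ⟨y, hy, h1, h2⟩)
      · exact Or.inr ⟨j, hj, y, hy, h1, h2⟩

-- the index-deletion pass over enumerate equals a value-based filter
theorem enum_del_filter (P : String → Bool) (T : PySem.Set Int) :
    ∀ (l : List String) (s : Int),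
      (∀ (k : Nat) (h : k < l.length), ((s + (k : Int)) ∈ T ↔ P l[k] = true)) →
      ((PySem.List.enumerate l s).foldl
        (fun acc ci => if !(PySem.Set.contains T ci.1) then acc ++ [ci.2] else acc) [])
        = l.filter (fun j => !P j) := by
  intro l
  induction l with
  | nil => intro s _; simp [PySem.List.enumerate]
  | cons x xs ih =>
    intro s hT
    rw [PySem.List.enumerate_cons]
    simp only [List.foldl_cons]
    have h0 : (s ∈ T) ↔ P x = true := by
      have := hT 0 (by simp)
      simpa using this
    have htail : ∀ (k : Nat) (h : k < xs.length), ((s + 1 + (k : Int)) ∈ T ↔ P xs[k] = true) := by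
      intro k h
      have h2 := hT (k + 1) (Nat.succ_lt_succ h)
      rw [show ((k + 1 : Nat) : Int) = (k : Int) + 1 by push_cast; ring] at h2
      rw [show s + ((k : Int) + 1) = s + 1 + (k : Int) by ring] at h2
      simpa using h2
    have hcont : PySem.Set.contains T s = decide (s ∈ T) := by
      simp [PySem.Set.contains]
    have hxs := ih (s + 1) htail
    rw [PySem.List.foldl_append_if (fun ci => !(PySem.Set.contains T ci.1)) Prod.snd
      (PySem.List.enumerate xs (s + 1)) []] at hxs
    simp only [List.nil_append] at hxs
    cases hP : P x
    · have hc : PySem.Set.contains T s = false := by rw [hcont]; simp [h0, hP]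
      rw [hc]
      simp only [Bool.not_false, if_true, List.nil_append]
      rw [PySem.List.foldl_append_if (fun ci => !(PySem.Set.contains T ci.1)) Prod.snd
        (PySem.List.enumerate xs (s + 1)) [x]]
      rw [hxs]
      simp [hP]
    · have hc : PySem.Set.contains T s = true := by rw [hcont]; simp [h0, hP]
      rw [hc]
      simp only [Bool.not_true, Bool.false_eq_true, if_false]
      rw [PySem.List.foldl_append_if (fun ci => !(PySem.Set.contains T ci.1)) Prod.snd
        (PySem.List.enumerate xs (s + 1)) []]
      simp only [List.nil_append]
      rw [hxs]
      simp [hP]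

theorem column_heuristic_spec : Claim_equal_column_heuristic := by
  intro columns patterns ic ap _
  unfold Spec_column_heuristic column_heuristic column_heuristic_alt
  set pred : String → Bool := fun col => chAInner col ic patterns with hpred
  have hpred' : ∀ c, bMatches (PySem.Str.lower c) ic patterns = pred c := by
    intro c; rw [hpred]; exact (chAInner_eq c ic patterns).symm
  rcases ap with _ | l
  all_goals simp only [PySem.List.foldl_append_if_eq_filter, List.nil_append]
  ·
    apply (List.filter_congr _).symm
    intro c _
    have he : PySem.Set.contains (PySem.Set.empty : PySem.Set String) (PySem.Str.lower c) = false := rfl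
    rw [hpred' c, he]
    simp [hpred]
  · cases hl : l.isEmpty
    · rw [if_neg (by simp [hl])]
      set chosen := columns.filter pred with hchosen
      set P : String → Bool := fun j => l.any (fun i => PySem.Str.lower j == PySem.Str.lower i) with hP
      rw [enum_del_filter P _ chosen 0]
      · rw [hchosen, List.filter_filter]
        apply List.filter_congr
        intro c _
        have hmem : (PySem.Set.contains (PySem.Set.ofList (l.map PySem.Str.lower)) (PySem.Str.lower c)) = P c := by
          simp only [PySem.Set.contains, hP]
          rw [Bool.eq_iff_iff]
          simp [PySem.Set.mem_ofList, List.mem_map, List.any_eq_true]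
          constructor
          · rintro ⟨i, hi, h⟩; exact ⟨i, hi, h.symm⟩
          · rintro ⟨i, hi, h⟩; exact ⟨i, hi, h.symm⟩
        rw [hpred' c]
        simp only [hl, Bool.false_eq_true, if_false]
        rw [hmem, Bool.and_comm]
      · intro k h
        rw [mem_toDel]
        simp only [PySem.Set.empty, List.not_mem_nil, false_or, hP, List.any_eq_true, beq_iff_eq]
        constructor
        · rintro ⟨i, hi, x, hx, hlow, hfst⟩
          rw [PySem.List.mem_enumerate_iff] at hx
          obtain ⟨k', hk', rfl⟩ := hx
          simp only [] at hfst hlow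
          have : k' = k := by omega
          subst this
          exact ⟨i, hi, by simpa using hlow⟩
        · rintro ⟨i, hi, hlow⟩
          refine ⟨i, hi, (0 + (k : Int), chosen[k]), ?_, by simpa using hlow, rfl⟩
          rw [PySem.List.mem_enumerate_iff]
          exact ⟨k, h, rfl⟩
    · rw [if_pos rfl]
      apply (List.filter_congr _).symm
      intro c _
      have hif : (if true = true then (PySem.Set.empty : PySem.Set String)
          else PySem.Set.ofList (l.map PySem.Str.lower)) = PySem.Set.empty := if_pos rfl
      have he : PySem.Set.contains (PySem.Set.empty : PySem.Set String) (PySem.Str.lower c) = false := rfl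
      rw [hpred' c, hif, he]
      simp [hpred]
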